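-- pv_equiv track=rewrite | github.com/flask-dashboard/Flask-MonitoringDashboard | flask_monitoringdashboard/views/details/grouped_profiler.py | sort_lines
-- ===== SOURCE A (Python) =====
-- SEPARATOR = ' / '
--
-- def has_prefix(path, prefix):
--     """
--     :param path: execution path line
--     :param prefix
--     :return: True, if the path contains the prefix
--     """
--     if prefix is None:
--         return True
--     return path.startswith(prefix)
--
-- def sort_equal_level_paths(paths):
--     """
--         :param paths: List of tuples (ExecutionPathLines, [hits])
--         :return: list sorted based on the total number of hits
--         """
--     return sorted(paths, key=lambda tup: sum(tup[1]), reverse=True)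
--
-- def sort_lines(lines, partial_list, level=1, prefix=None):
--     """
--     Returns the list of execution path lines, in the order they are supposed to be printed.
--     As input, it will get something like: [def endpoint():_/_g()_/_f(), def endpoint():_/_g()_/_f()_/_time.sleep(1),
--     def endpoint():_/_g(), @app.route('/endpoint'), def endpoint():_/_f()_/_time.sleep(1), def endpoint():,
--     def endpoint():_/_f()]. The sorted list should be:
--     [@app.route('/endpoint'), def endpoint():, def endpoint():_/_time.sleep(0.001), def endpoint():_/_f(),
--     def endpoint():_/_f()_/_time.sleep(1), def endpoint():_/_g(), def endpoint():_/_g()_/_f(),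
--     def endpoint():_/_g()_/_f()_/_time.sleep(1)]
--
--     :param lines: List of tuples (ExecutionPathLines, [hits])
--     :param partial_list: the final list at different moments of computation
--     :param level: the tree depth. level 1 means root
--     :param prefix: this represents the parent node in the tree
--     :return: List of sorted tuples
--     """
--     equal_level_paths = []
--     for l in lines:
--         if len(l[0].split(SEPARATOR)) == level:
--             equal_level_paths.append(l)
--
--     # if we reached the end of a branch, return
--     if len(equal_level_paths) == 0:
--         return partial_list
--
--     if level == 1:  # ugly hardcoding to ensure that @app.route stays first
--         equal_level_paths = sorted(equal_level_paths, key=lambda tup: tup[0])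
--     else:  # we want to display branches with most hits first
--         equal_level_paths = sort_equal_level_paths(equal_level_paths)
--
--     for l in equal_level_paths:
--         if has_prefix(l[0], prefix):
--             partial_list.append(l)
--             sort_lines(lines, partial_list, level + 1, prefix=l[0])
--     return partial_list
-- ===== SOURCE B (Python) =====
-- SEPARATOR = ' / '
--
-- def sort_lines(lines, partial_list, level=1, prefix=None):
--     # Bucket lines by tree depth once and sort each bucket once,
--     # then a single DFS over the pre-sorted buckets emits the output.
--     buckets = {}
--     for l in lines:
--         buckets.setdefault(len(l[0].split(SEPARATOR)), []).append(l)
--     for lvl, bucket in buckets.items():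
--         if lvl == 1:
--             bucket.sort(key=lambda t: t[0])
--         else:
--             bucket.sort(key=lambda t: sum(t[1]), reverse=True)
--
--     def dfs(lvl, pref):
--         for l in buckets.get(lvl, []):
--             if pref is None or l[0].startswith(pref):
--                 partial_list.append(l)
--                 dfs(lvl + 1, l[0])
--
--     dfs(level, prefix)
--     return partial_list
-- ===== Notes on version B (the rewrite author's own statement) =====
-- stated objective: alternative
-- what changed: B buckets the lines by tree depth in one pass and sorts each depth bucket exactly once up front, then a single DFS walks the pre-sorted buckets, where A re-filters the whole input list and re-sorts the level's paths at every recursive call.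
import Mathlib
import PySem

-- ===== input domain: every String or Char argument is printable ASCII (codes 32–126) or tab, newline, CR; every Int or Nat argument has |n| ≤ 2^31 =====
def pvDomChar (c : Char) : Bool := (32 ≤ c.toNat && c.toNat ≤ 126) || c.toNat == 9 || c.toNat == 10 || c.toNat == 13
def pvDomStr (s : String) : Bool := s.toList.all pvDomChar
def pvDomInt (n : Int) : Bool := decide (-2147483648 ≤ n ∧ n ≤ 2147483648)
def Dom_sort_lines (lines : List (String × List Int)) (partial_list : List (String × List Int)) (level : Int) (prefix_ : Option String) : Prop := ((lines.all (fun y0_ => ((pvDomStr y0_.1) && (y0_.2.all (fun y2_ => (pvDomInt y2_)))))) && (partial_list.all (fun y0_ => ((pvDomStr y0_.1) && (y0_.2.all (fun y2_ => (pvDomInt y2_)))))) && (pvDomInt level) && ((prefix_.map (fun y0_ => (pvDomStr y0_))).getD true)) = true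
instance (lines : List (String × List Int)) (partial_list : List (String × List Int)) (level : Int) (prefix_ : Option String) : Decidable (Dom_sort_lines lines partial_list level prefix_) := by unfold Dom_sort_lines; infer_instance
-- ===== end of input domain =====

-- B buckets the lines by tree depth once and sorts each bucket once, then a single DFS
-- over the pre-sorted buckets emits the output (A re-filters and re-sorts at every node).
-- Both Pythons mutate partial_list in place identically; the equivalence proved here is
-- about the return value.

-- ===== PORT A =====
-- len(l[0].split(SEPARATOR)) with SEPARATOR = ' / '
def pvSplitLen (s : String) : Int := ((PySem.Chars.splitOn s.toList " / ".toList).length : Int)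

-- has_prefix(path, prefix)
def pvHasPrefix (path : String) (pref : Option String) : Bool :=
  match pref with
  | none => true
  | some p => PySem.Str.startswith path p

-- sort_equal_level_paths(paths) = sorted(paths, key=lambda tup: sum(tup[1]), reverse=True)
def pvSortEqualLevelPaths (paths : List (String × List Int)) : List (String × List Int) :=
  PySem.List.sorted paths (fun t => t.2.sum) true

-- fuel for the recursion: 1 + the largest depth occurring in lines, minus the start level;
-- when fuel reaches 0 the level exceeds every depth, so Python's filter is empty and it
-- returns partial_list — which is exactly what the fuel-0 branch does (totality guard only).
def pvMaxLevel (lines : List (String × List Int)) : Int :=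
  lines.foldl (fun m l => max m (pvSplitLen l.1)) 0

def sortLinesGoA (lines : List (String × List Int)) :
    Nat → Int → Option String → List (String × List Int) → List (String × List Int)
  | 0, _, _, acc => acc
  | fuel+1, level, prefix_, acc =>
    let eq_paths := lines.filter (fun l => pvSplitLen l.1 == level)
    if eq_paths.length == 0 then acc
    else
      let eqs := if level == 1 then PySem.List.sorted eq_paths (fun t => t.1) false
                 else pvSortEqualLevelPaths eq_paths
      eqs.foldl (fun p l =>
        if pvHasPrefix l.1 prefix_ then
          sortLinesGoA lines fuel (level + 1) (some l.1) (p ++ [l])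
        else p) acc

def sort_lines (lines : List (String × List Int)) (partial_list : List (String × List Int)) (level : Int) (prefix_ : Option String) : List (String × List Int) :=
  sortLinesGoA lines (pvMaxLevel lines + 1 - level).toNat level prefix_ partial_list

-- ===== PORT B =====
-- buckets.setdefault(len(l[0].split(SEPARATOR)), []).append(l)  ==  modify key [] (· ++ [l])
def pvBucketsRaw (lines : List (String × List Int)) : PySem.Dict Int (List (String × List Int)) :=
  lines.foldl (fun d l => d.modify (pvSplitLen l.1) [] (fun v => v ++ [l])) PySem.Dict.empty

-- the in-place per-bucket sort (level 1 by path, otherwise by total hits, descending)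
def pvSortBucket (lvl : Int) (b : List (String × List Int)) : List (String × List Int) :=
  if lvl == 1 then PySem.List.sorted b (fun t => t.1) false
  else PySem.List.sorted b (fun t => t.2.sum) true

def pvBucketsSorted (lines : List (String × List Int)) : PySem.Dict Int (List (String × List Int)) :=
  PySem.Dict.mk ((pvBucketsRaw lines).items.map (fun kv => (kv.1, pvSortBucket kv.1 kv.2)))

def sortLinesGoB (buckets : PySem.Dict Int (List (String × List Int))) :
    Nat → Int → Option String → List (String × List Int) → List (String × List Int)
  | 0, _, _, acc => acc
  | fuel+1, lvl, pref, acc =>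
    (buckets.getD lvl []).foldl (fun p l =>
      if (match pref with
          | none => true
          | some s => PySem.Str.startswith l.1 s) then
        sortLinesGoB buckets fuel (lvl + 1) (some l.1) (p ++ [l])
      else p) acc

def sort_lines_alt (lines : List (String × List Int)) (partial_list : List (String × List Int)) (level : Int) (prefix_ : Option String) : List (String × List Int) :=
  sortLinesGoB (pvBucketsSorted lines) (pvMaxLevel lines + 1 - level).toNat level prefix_ partial_list

-- ===== PRECONDITION & SPEC =====
def Spec_sort_lines (lines : List (String × List Int)) (partial_list : List (String × List Int)) (level : Int) (prefix_ : Option String) (out : List (String × List Int)) : Prop := out = sort_lines_alt lines partial_list level prefix_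
instance (lines : List (String × List Int)) (partial_list : List (String × List Int)) (level : Int) (prefix_ : Option String) (out : List (String × List Int)) : Decidable (Spec_sort_lines lines partial_list level prefix_ out) := by unfold Spec_sort_lines; infer_instance

-- ===== CLAIM (what is proved, stated in full; the proofs are below) =====
def Claim_equal_sort_lines : Prop := ∀ (lines : List (String × List Int)) (partial_list : List (String × List Int)) (level : Int) (prefix_ : Option String), Dom_sort_lines lines partial_list level prefix_ → Spec_sort_lines lines partial_list level prefix_ (sort_lines lines partial_list level prefix_)

-- ===== LEMMAS AND PROOFS =====

theorem pvSortBucket_nil (lvl : Int) : pvSortBucket lvl [] = [] := by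
  unfold pvSortBucket
  split <;> simp [PySem.List.sorted_eq_nil_iff]

-- mapping g over the values of a literal dict maps g over each lookup
theorem pv_get?_mk_map {V : Type} (l : List (Int × V)) (g : Int → V → V) (c : Int) :
    (PySem.Dict.mk (l.map (fun kv => (kv.1, g kv.1 kv.2)))).get? c
      = ((PySem.Dict.mk l).get? c).map (g c) := by
  induction l with
  | nil => rfl
  | cons kv rest ih =>
      obtain ⟨k, v⟩ := kv
      simp only [List.map_cons, PySem.Dict.get?_mk_cons]
      by_cases h : k = c
      · subst h; simp
      · simp only [beq_iff_eq, h, if_false, ih]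

-- the raw bucket at c is exactly A's level-c filter
theorem pv_bucketsRaw_getD (lines : List (String × List Int)) (c : Int) :
    (pvBucketsRaw lines).getD c [] = lines.filter (fun l => pvSplitLen l.1 == c) := by
  unfold pvBucketsRaw
  rw [← List.foldl_map (f := fun l : String × List Int => (pvSplitLen l.1, l))
        (g := fun (d : PySem.Dict Int (List (String × List Int))) p =>
          d.modify p.1 [] (fun v => v ++ [p.2]))]
  rw [PySem.Dict.getD_foldl_modify_append]
  simp [List.filter_map, List.map_map, Function.comp_def]

-- the sorted bucket at c is A's sorted level-c list
theorem pv_bucketsSorted_getD (lines : List (String × List Int)) (c : Int) :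
    (pvBucketsSorted lines).getD c []
      = pvSortBucket c (lines.filter (fun l => pvSplitLen l.1 == c)) := by
  unfold pvBucketsSorted
  rw [PySem.Dict.getD_eq_get?_getD, pv_get?_mk_map]
  rcases h : (pvBucketsRaw lines).get? c with _ | v
  · have h0 : (pvBucketsRaw lines).getD c [] = [] :=
      PySem.Dict.getD_of_get?_eq_none _ _ h
    rw [pv_bucketsRaw_getD] at h0
    rw [h0, pvSortBucket_nil]
    rfl
  · have h0 : (pvBucketsRaw lines).getD c [] = v :=
      PySem.Dict.getD_of_get?_eq_some _ _ h
    rw [pv_bucketsRaw_getD] at h0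
    simp [← h0]

theorem pv_go_eq (lines : List (String × List Int)) :
    ∀ (fuel : Nat) (lvl : Int) (pref : Option String) (acc : List (String × List Int)),
      sortLinesGoA lines fuel lvl pref acc
        = sortLinesGoB (pvBucketsSorted lines) fuel lvl pref acc := by
  intro fuel
  induction fuel with
  | zero => intro _ _ _; rfl
  | succ fuel ih =>
      intro lvl pref acc
      rw [sortLinesGoA, sortLinesGoB, pv_bucketsSorted_getD]
      have hfun : (fun (p : List (String × List Int)) (l : String × List Int) =>
            if pvHasPrefix l.1 pref then
              sortLinesGoA lines fuel (lvl + 1) (some l.1) (p ++ [l]) else p)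
          = (fun p l =>
            if (match pref with
                | none => true
                | some s => PySem.Str.startswith l.1 s) then
              sortLinesGoB (pvBucketsSorted lines) fuel (lvl + 1) (some l.1) (p ++ [l]) else p) := by
        funext p l
        rw [ih]
        rfl
      by_cases hempty : lines.filter (fun l => pvSplitLen l.1 == lvl) = []
      · simp [hempty, pvSortBucket_nil]
      · have hlen : ((lines.filter (fun l => pvSplitLen l.1 == lvl)).length == 0) = false := by
          simp [List.length_eq_zero_iff, hempty]
        simp only [hlen, Bool.false_eq_true, if_false]
        rw [← hfun]
        rfl

-- ===== VERDICT (by name: the statement is the Claim_ definition above) =====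
theorem sort_lines_spec : Claim_equal_sort_lines := by
  intro lines partial_list level prefix_ _
  unfold Spec_sort_lines sort_lines sort_lines_alt
  exact pv_go_eq lines _ level prefix_ partial_list
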